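-- pv_equiv track=rewrite | github.com/christopherkullenberg/gendercounter | gendercounter.py | raknakvinnor
-- ===== SOURCE A (Python) =====
-- def raknakvinnor(kvinnodict, text):
--     kvinnocounter = 0 #counts absolute numbers of names
--     kvinnonamnfrekvens = {} #counts unique names
--     for t in text:
--         if t in kvinnodict:
--             kvinnonamnfrekvens[t] = kvinnodict[t]
--             kvinnocounter += 1
--     return(kvinnonamnfrekvens, kvinnocounter)
-- ===== SOURCE B (Python) =====
-- def raknakvinnor(kvinnodict, text):
--     counts = {}
--     for t in text:
--         counts[t] = counts.get(t, 0) + 1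
--     freq = {t: kvinnodict[t] for t in counts if t in kvinnodict}
--     return freq, sum(counts[t] for t in freq)
-- ===== Notes on version B (the rewrite author's own statement) =====
-- stated objective: alternative
-- what changed: B first builds an occurrence table of the text in one counting pass, then iterates that table's distinct keys against the dict to build the frequency dict and sums the stored occurrence counts, instead of probing the dict for every token and incrementing a counter per token.
import Mathlib
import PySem

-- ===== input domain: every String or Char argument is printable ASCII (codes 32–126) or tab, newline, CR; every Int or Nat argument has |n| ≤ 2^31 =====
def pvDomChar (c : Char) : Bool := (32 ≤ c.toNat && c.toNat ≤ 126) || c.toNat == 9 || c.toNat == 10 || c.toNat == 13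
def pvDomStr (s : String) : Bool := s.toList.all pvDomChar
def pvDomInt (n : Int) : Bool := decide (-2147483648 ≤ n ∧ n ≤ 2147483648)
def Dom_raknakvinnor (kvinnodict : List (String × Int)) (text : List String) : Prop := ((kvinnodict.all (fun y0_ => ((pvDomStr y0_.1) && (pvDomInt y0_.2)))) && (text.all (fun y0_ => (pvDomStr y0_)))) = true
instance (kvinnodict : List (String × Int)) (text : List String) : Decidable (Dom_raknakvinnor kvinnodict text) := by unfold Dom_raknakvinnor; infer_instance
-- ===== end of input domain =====

-- B replaces A's scan-text-and-probe-the-dict loop by a one-pass occurrence table of the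
-- text followed by a loop over the table's distinct keys (alternative decomposition, same cost).

-- ===== PORT A =====
def raknakvinnor (kvinnodict : List (String × Int)) (text : List String) : (List (String × Int)) × Int :=
  let kd := PySem.Dict.ofList kvinnodict
  let r := text.foldl (fun (st : PySem.Dict String Int × Int) t =>
      match kd.get? t with                                 -- 'if t in kvinnodict: … kvinnodict[t] …'
      | some v => (st.1.insert t v, st.2 + 1)
      | none => st) (PySem.Dict.empty, 0)
  (r.1.items, r.2)

-- ===== PORT B =====
def raknakvinnor_alt (kvinnodict : List (String × Int)) (text : List String) : (List (String × Int)) × Int :=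
  let kd := PySem.Dict.ofList kvinnodict
  let counts := text.foldl (fun (d : PySem.Dict String Int) t => d.insert t (d.getD t 0 + 1)) PySem.Dict.empty
  let freq := counts.keys.foldl (fun (f : PySem.Dict String Int) t =>
      match kd.get? t with
      | some v => f.insert t v
      | none => f) PySem.Dict.empty
  let total := freq.keys.foldl (fun (s : Int) t => s + counts.getD t 0) 0
  (freq.items, total)

-- ===== PRECONDITION & SPEC =====
def Spec_raknakvinnor (kvinnodict : List (String × Int)) (text : List String) (out : (List (String × Int)) × Int) : Prop := out = raknakvinnor_alt kvinnodict text
instance (kvinnodict : List (String × Int)) (text : List String) (out : (List (String × Int)) × Int) : Decidable (Spec_raknakvinnor kvinnodict text out) := by unfold Spec_raknakvinnor; infer_instance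

-- ===== CLAIM (what is proved, stated in full; the proofs are below) =====
def Claim_equal_raknakvinnor : Prop := ∀ (kvinnodict : List (String × Int)) (text : List String), Dom_raknakvinnor kvinnodict text → Spec_raknakvinnor kvinnodict text (raknakvinnor kvinnodict text)

-- ===== LEMMAS AND PROOFS =====

-- B's freq loop over a key list L
def freqFold (kd : PySem.Dict String Int) (L : List String) : PySem.Dict String Int :=
  L.foldl (fun (f : PySem.Dict String Int) t =>
      match kd.get? t with
      | some v => f.insert t v
      | none => f) PySem.Dict.empty

theorem freqFold_append (kd : PySem.Dict String Int) (L : List String) (t : String) :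
    freqFold kd (L ++ [t]) =
      (match kd.get? t with
       | some v => (freqFold kd L).insert t v
       | none => freqFold kd L) := by
  simp [freqFold, List.foldl_append]

theorem get?_freqFold (kd : PySem.Dict String Int) (L : List String) (s : String) :
    (freqFold kd L).get? s = if s ∈ L then kd.get? s else none := by
  induction L using List.reverseRecOn with
  | nil => simp [freqFold]
  | append_singleton L t ih =>
    rw [freqFold_append]
    rcases h : kd.get? t with _ | v
    · by_cases hst : s = t
      · subst hst; simp [ih, h]
      · simp [ih, hst]
    · by_cases hst : s = t
      · subst hst; simp [PySem.Dict.get?_insert_self, h]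
      · rw [PySem.Dict.get?_insert_of_ne _ _ hst, ih]
        simp [hst]

theorem keys_freqFold (kd : PySem.Dict String Int) (L : List String) (hL : L.Nodup) :
    (freqFold kd L).keys = L.filter (fun t => (kd.get? t).isSome) := by
  induction L using List.reverseRecOn with
  | nil => simp [freqFold]
  | append_singleton L t ih =>
    have hnd : L.Nodup := hL.of_append_left
    have htL : t ∉ L := by
      intro hmem
      exact (List.disjoint_of_nodup_append hL) hmem (List.mem_singleton_self t)
    rw [freqFold_append]
    rcases h : kd.get? t with _ | v
    · simp [List.filter_append, h, ih hnd]
    · have hnc : (freqFold kd L).contains t = false := by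
        rw [PySem.Dict.contains_eq_isSome_get?, get?_freqFold]
        simp [htL]
      rw [PySem.Dict.keys_insert_of_not_contains _ _ hnc, ih hnd]
      simp [List.filter_append, h]

theorem nodup_keys_freqFold (kd : PySem.Dict String Int) (L : List String) (hL : L.Nodup) :
    (freqFold kd L).keys.Nodup := by
  rw [keys_freqFold kd L hL]; exact hL.filter _

-- inserting the binding a nodup-keyed dict already holds is a no-op
theorem insert_eq_self {ν : Type} (d : PySem.Dict String ν) (k : String) (v : ν)
    (hnd : d.keys.Nodup) (h : d.get? k = some v) : d.insert k v = d := by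
  apply PySem.Dict.ext
  have hc : d.contains k = true := by
    rw [PySem.Dict.contains_eq_isSome_get?, h]; rfl
  rw [PySem.Dict.items_insert_of_contains d v hc]
  conv_rhs => rw [← List.map_id (PySem.Dict.items d)]
  apply List.map_congr_left
  intro p hp
  by_cases hpk : p.1 = k
  · have : d.get? p.1 = some p.2 := PySem.Dict.get?_of_mem_items _ hp hnd
    rw [hpk] at this
    rw [h] at this
    have : p = (k, v) := by
      rcases p with ⟨pk, pv⟩
      simp at hpk this
      simp [hpk, this]
    simp [this]
  · simp [hpk]

-- summing (g with the value at one member bumped by one) over a nodup list adds one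
theorem sum_bump (L : List String) (g : String → Int) (t : String)
    (hL : L.Nodup) (ht : t ∈ L) :
    (L.map (fun s => if s = t then g s + 1 else g s)).sum = (L.map g).sum + 1 := by
  induction L with
  | nil => cases ht
  | cons a L ih =>
    by_cases hat : a = t
    · subst hat
      have hnotin : a ∉ L := (List.nodup_cons.mp hL).1
      have hmapeq : L.map (fun s => if s = a then g s + 1 else g s) = L.map g := by
        apply List.map_congr_left
        intro x hx
        have hxa : x ≠ a := fun he => hnotin (he ▸ hx)
        simp [hxa]
      simp [hmapeq]; ring
    · have hnd : L.Nodup := (List.nodup_cons.mp hL).2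
      have hmem : t ∈ L := by
        rcases List.mem_cons.mp ht with h1 | h1
        · exact absurd h1.symm hat
        · exact h1
      simp [hat, ih hnd hmem]; ring

-- total over a fixed key list K, as a sum
theorem total_as_sum (K : List String) (c : PySem.Dict String Int) :
    K.foldl (fun (s : Int) t => s + c.getD t 0) 0 = (K.map (fun t => c.getD t 0)).sum := by
  have := PySem.List.foldl_add K (fun t => c.getD t 0) 0
  simpa using this

-- main invariant: A's fold state equals B's recomputation from the counter
theorem main_inv (kd : PySem.Dict String Int) (text : List String) :
    text.foldl (fun (st : PySem.Dict String Int × Int) t =>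
      match kd.get? t with
      | some v => (st.1.insert t v, st.2 + 1)
      | none => st) (PySem.Dict.empty, 0)
    = (freqFold kd (PySem.Dict.counter text).keys,
       ((freqFold kd (PySem.Dict.counter text).keys).keys.map
          (fun t => (PySem.Dict.counter text).getD t 0)).sum) := by
  induction text using List.reverseRecOn with
  | nil => rfl
  | append_singleton ys t ih =>
    rw [List.foldl_append, List.foldl_cons, List.foldl_nil, ih]
    have hkeys' : (PySem.Dict.counter (ys ++ [t])).keys = PySem.Set.add (PySem.Dict.counter ys).keys t := by
      rw [PySem.Dict.keys_counter, PySem.Dict.keys_counter, PySem.Set.ofList_append_singleton]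
    have hndk : (PySem.Dict.counter ys).keys.Nodup := PySem.Dict.nodup_keys_counter ys
    have hmemk : ∀ s, s ∈ (PySem.Dict.counter ys).keys ↔ s ∈ ys := by
      intro s; rw [PySem.Dict.keys_counter]; simp [PySem.Set.mem_ofList]
    have hgetD' : ∀ s, (PySem.Dict.counter (ys ++ [t])).getD s 0 =
        if s = t then (PySem.Dict.counter ys).getD s 0 + 1 else (PySem.Dict.counter ys).getD s 0 := by
      intro s
      rw [PySem.Dict.getD_counter, PySem.Dict.getD_counter]
      by_cases hst : s = t
      · simp [hst, List.count_append]
      · have hts : t ≠ s := fun he => hst he.symm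
        simp [hst, List.count_append, hts]
    by_cases htys : t ∈ ys
    · -- keys unchanged
      have hkeq : (PySem.Dict.counter (ys ++ [t])).keys = (PySem.Dict.counter ys).keys := by
        rw [hkeys', PySem.Set.add_of_mem ((hmemk t).mpr htys)]
      rw [hkeq]
      rcases h : kd.get? t with _ | v
      · -- t not in kd: state unchanged; sums agree since t not among freq keys
        dsimp only
        simp only [Prod.mk.injEq, true_and]
        apply congrArg List.sum
        apply List.map_congr_left
        intro s hs
        rw [keys_freqFold kd _ hndk] at hs
        have hsk : s ∈ (PySem.Dict.counter ys).keys := (List.mem_filter.mp hs).1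
        have hsome : (kd.get? s).isSome := by simpa using (List.mem_filter.mp hs).2
        have hst : s ≠ t := by
          intro he; rw [he, h] at hsome; simp at hsome
        rw [hgetD']; simp [hst]
      · -- t in kd and already counted: insert is a no-op, total bumps by one
        dsimp only
        have hins : (freqFold kd (PySem.Dict.counter ys).keys).insert t v
            = freqFold kd (PySem.Dict.counter ys).keys := by
          apply insert_eq_self _ _ _ (nodup_keys_freqFold kd _ hndk)
          rw [get?_freqFold, if_pos ((hmemk t).mpr htys)]; exact h
        rw [hins]
        simp only [Prod.mk.injEq, true_and]
        have hmemfreq : t ∈ (freqFold kd (PySem.Dict.counter ys).keys).keys := by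
          rw [keys_freqFold kd _ hndk, List.mem_filter]
          exact ⟨(hmemk t).mpr htys, by simp [h]⟩
        have hndfreq : (freqFold kd (PySem.Dict.counter ys).keys).keys.Nodup :=
          nodup_keys_freqFold kd _ hndk
        symm
        calc ((freqFold kd (PySem.Dict.counter ys).keys).keys.map
                (fun s => (PySem.Dict.counter (ys ++ [t])).getD s 0)).sum
            = ((freqFold kd (PySem.Dict.counter ys).keys).keys.map
                (fun s => if s = t then (PySem.Dict.counter ys).getD s 0 + 1
                          else (PySem.Dict.counter ys).getD s 0)).sum := by
              apply congrArg List.sum; apply List.map_congr_left; intro s _; exact hgetD' s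
          _ = ((freqFold kd (PySem.Dict.counter ys).keys).keys.map
                (fun s => (PySem.Dict.counter ys).getD s 0)).sum + 1 :=
              sum_bump _ _ t hndfreq hmemfreq
    · -- t is a fresh token
      have htk : t ∉ (PySem.Dict.counter ys).keys := fun hmem => htys ((hmemk t).mp hmem)
      have hkeq : (PySem.Dict.counter (ys ++ [t])).keys = (PySem.Dict.counter ys).keys ++ [t] := by
        rw [hkeys', PySem.Set.add_of_not_mem htk]
      rw [hkeq, freqFold_append]
      rcases h : kd.get? t with _ | v
      · -- t not in kd: freq unchanged (its key list grows by a filtered-out key)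
        dsimp only
        simp only [Prod.mk.injEq, true_and]
        apply congrArg List.sum
        apply List.map_congr_left
        intro s hs
        rw [keys_freqFold kd _ hndk] at hs
        have hsk : s ∈ (PySem.Dict.counter ys).keys := (List.mem_filter.mp hs).1
        have hst : s ≠ t := fun he => htk (he ▸ hsk)
        rw [hgetD']; simp [hst]
      · -- t in kd and fresh: a new freq key worth exactly one occurrence
        dsimp only
        simp only [Prod.mk.injEq, true_and]
        have hndfreq := nodup_keys_freqFold kd _ hndk
        have hnc : (freqFold kd (PySem.Dict.counter ys).keys).contains t = false := by
          rw [PySem.Dict.contains_eq_isSome_get?, get?_freqFold, if_neg htk]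
          rfl
        rw [PySem.Dict.keys_insert_of_not_contains _ _ hnc, List.map_append, List.sum_append]
        have hzero : (PySem.Dict.counter ys).getD t 0 = 0 := by
          rw [PySem.Dict.getD_counter]
          simp [List.count_eq_zero.mpr htys]
        have : ((freqFold kd (PySem.Dict.counter ys).keys).keys.map
                  (fun s => (PySem.Dict.counter (ys ++ [t])).getD s 0)).sum
             = ((freqFold kd (PySem.Dict.counter ys).keys).keys.map
                  (fun s => (PySem.Dict.counter ys).getD s 0)).sum := by
          apply congrArg List.sum; apply List.map_congr_left
          intro s hs
          rw [keys_freqFold kd _ hndk] at hs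
          have hsk : s ∈ (PySem.Dict.counter ys).keys := (List.mem_filter.mp hs).1
          have hst : s ≠ t := fun he => htk (he ▸ hsk)
          rw [hgetD']; simp [hst]
        rw [this]
        have hlast : (PySem.Dict.counter (ys ++ [t])).getD t 0 = 1 := by
          rw [hgetD' t, if_pos rfl, hzero]
          norm_num
        simp only [List.map_cons, List.map_nil, List.sum_cons, List.sum_nil, hlast]
        ring

-- ===== VERDICT (by name: the statement is the Claim_ definition above) =====
theorem raknakvinnor_spec : Claim_equal_raknakvinnor := by
  intro kvinnodict text _
  unfold Spec_raknakvinnor raknakvinnor raknakvinnor_alt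
  have hc : text.foldl (fun (d : PySem.Dict String Int) t => d.insert t (d.getD t 0 + 1)) PySem.Dict.empty
      = PySem.Dict.counter text := PySem.Dict.foldl_insert_getD_add_one_eq_counter text
  simp only [hc]
  rw [main_inv (PySem.Dict.ofList kvinnodict) text]
  simp only [freqFold, Prod.mk.injEq, true_and]
  rw [total_as_sum]
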